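-- pv_equiv track=rewrite | github.com/crapas1974/algo2 | datastructure/permitted_pattern.py | by_matching2
-- ===== SOURCE A (Python) =====
-- def by_matching2(inputs, pattern):
--     not_permitted_list = []
--     for i, input_pattern in enumerate(inputs):
--         for i in range(len(input_pattern)):
--             if input_pattern[i] == '1' and i in pattern[1]:
--                 not_permitted_list.append(i)
--                 break
--         # n = inputs[i]
--         # jari = 0
--         # while n > 0:
--         #     if n % 2 == 1:
--         #         if pattern[0] - jari - 1 in pattern[1]:
--         #             not_permitted_list.append(i)
--         #             break
--         #     n //= 2
--         #     jari += 1
--     return not_permitted_list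
-- ===== SOURCE B (Python) =====
-- def by_matching2(inputs, pattern):
--     forb = sorted(set(p for p in pattern[1] if p >= 0))
--     result = []
--     for s in inputs:
--         for p in forb:
--             if p >= len(s):
--                 break
--             if s[p] == '1':
--                 result.append(p)
--                 break
--     return result
-- ===== Notes on version B (the rewrite author's own statement) =====
-- stated objective: alternative
-- what changed: Instead of scanning every character of each input string in order with a linear membership test in pattern[1] per '1' bit, B sorts the deduplicated non-negative forbidden positions once and, per input, takes the first sorted position that is in range and holds '1', breaking as soon as positions exceed the string length.
-- outside the precondition, e.g. on by_matching2(['00'], []): A returns [], B raises IndexError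
import Mathlib
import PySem

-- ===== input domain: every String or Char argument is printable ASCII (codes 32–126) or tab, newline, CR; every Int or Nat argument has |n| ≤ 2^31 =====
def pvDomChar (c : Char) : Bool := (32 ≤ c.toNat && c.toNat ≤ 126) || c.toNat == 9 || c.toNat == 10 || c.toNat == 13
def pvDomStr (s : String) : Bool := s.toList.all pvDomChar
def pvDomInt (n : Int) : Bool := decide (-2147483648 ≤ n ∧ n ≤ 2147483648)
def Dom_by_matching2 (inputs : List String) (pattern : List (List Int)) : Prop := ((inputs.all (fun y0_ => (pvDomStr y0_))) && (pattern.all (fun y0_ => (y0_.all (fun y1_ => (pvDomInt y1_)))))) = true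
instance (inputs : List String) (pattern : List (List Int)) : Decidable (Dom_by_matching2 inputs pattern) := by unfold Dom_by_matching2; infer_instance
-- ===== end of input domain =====

-- B sorts the deduplicated non-negative forbidden positions once and, per input, takes the first
-- sorted position that is in range and holds '1' (breaking once positions exceed the string),
-- instead of A's character-by-character scan with a linear membership test per '1'.

-- ===== PORT A =====
-- inner 'for i in range(len(input_pattern)): if input_pattern[i] == '1' and i in pattern[1]: append i; break'
def pvScanA (s : String) (pat1 : List Int) : List Int → Option Int
  | [] => none
  | i :: rest =>
      if PySem.Str.pyGet? s i = some '1' ∧ i ∈ pat1 then some i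
      else pvScanA s pat1 rest

def by_matching2 (inputs : List String) (pattern : List (List Int)) : List Int :=
  inputs.foldl (fun acc s =>
    match pvScanA s ((PySem.List.pyGet? pattern 1).getD []) (PySem.List.pyRange 0 (PySem.Str.len s) 1) with
    | some i => acc ++ [i]
    | none => acc) []

-- ===== PORT B =====
-- inner 'for p in forb: if p >= len(s): break; if s[p] == '1': append p; break'
def pvScanB (s : String) : List Int → Option Int
  | [] => none
  | p :: rest =>
      if PySem.Str.len s ≤ p then none
      else if PySem.Str.pyGet? s p = some '1' then some p
      else pvScanB s rest

def by_matching2_alt (inputs : List String) (pattern : List (List Int)) : List Int :=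
  let forb := PySem.List.sorted (PySem.Set.ofList
      (((PySem.List.pyGet? pattern 1).getD []).filter (fun p => decide (0 ≤ p)))) (fun x => x)
  inputs.foldl (fun res s =>
    match pvScanB s forb with
    | some p => res ++ [p]
    | none => res) []

-- ===== PRECONDITION & SPEC =====
-- Pre_ requires pattern to have at least two rows: with fewer, Python A raises IndexError on
-- pattern[1] as soon as any input contains '1' (and returns [] only vacuously otherwise), and B
-- always raises there; those corner inputs are excluded.
def Pre_by_matching2 (inputs : List String) (pattern : List (List Int)) : Prop := 2 ≤ pattern.length
instance (inputs : List String) (pattern : List (List Int)) : Decidable (Pre_by_matching2 inputs pattern) := by unfold Pre_by_matching2; infer_instance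

def pvWitness_by_matching2 : List String × List (List Int) := (["01"], [[0], [1]])

def Spec_by_matching2 (inputs : List String) (pattern : List (List Int)) (out : List Int) : Prop := out = by_matching2_alt inputs pattern
instance (inputs : List String) (pattern : List (List Int)) (out : List Int) : Decidable (Spec_by_matching2 inputs pattern out) := by unfold Spec_by_matching2; infer_instance

-- ===== CLAIM (what is proved, stated in full; the proofs are below) =====
def Claim_equal_by_matching2 : Prop := ∀ (inputs : List String) (pattern : List (List Int)), Dom_by_matching2 inputs pattern → Pre_by_matching2 inputs pattern → Spec_by_matching2 inputs pattern (by_matching2 inputs pattern)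

-- ===== LEMMAS AND PROOFS =====

-- A's inner break-loop is find? on the index list
theorem pvScanA_eq_find? (s : String) (pat1 : List Int) (l : List Int) :
    pvScanA s pat1 l
      = l.find? (fun i => decide (PySem.Str.pyGet? s i = some '1' ∧ i ∈ pat1)) := by
  induction l with
  | nil => rfl
  | cons i rest ih =>
      simp only [pvScanA, List.find?]
      by_cases h1 : PySem.Str.pyGet? s i = some '1' <;> by_cases h2 : i ∈ pat1 <;>
        simp_all

-- B's inner break-loop on an ascending list is find? of 'in range and holds 1'
theorem pvScanB_eq_find? (s : String) (l : List Int) (hpw : l.Pairwise (· < ·)) :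
    pvScanB s l
      = l.find? (fun p => decide (p < PySem.Str.len s ∧ PySem.Str.pyGet? s p = some '1')) := by
  induction l with
  | nil => rfl
  | cons p rest ih =>
      rcases List.pairwise_cons.mp hpw with ⟨hall, htail⟩
      have hL : PySem.Str.len s = ((s.toList.length : Int)) := PySem.Str.len_eq s
      simp only [pvScanB, List.find?]
      by_cases hlen : PySem.Str.len s ≤ p
      · rw [if_pos hlen]
        rw [hL] at hlen
        have h1 : (decide (p < PySem.Str.len s ∧ PySem.Str.pyGet? s p = some '1')) = false := by
          rw [decide_eq_false_iff_not]
          rintro ⟨h, -⟩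
          rw [hL] at h; omega
        rw [h1]
        symm
        rw [List.find?_eq_none]
        intro y hy
        rw [Bool.not_eq_true, decide_eq_false_iff_not]
        rintro ⟨h, -⟩
        have := hall y hy
        rw [hL] at h; omega
      · rw [if_neg hlen]
        by_cases hc : PySem.Str.pyGet? s p = some '1'
        · rw [if_pos hc]
          have h1 : (decide (p < PySem.Str.len s ∧ PySem.Str.pyGet? s p = some '1')) = true := by
            rw [decide_eq_true_eq]
            refine ⟨?_, hc⟩
            rw [hL] at hlen ⊢; omega
          rw [h1]
        · rw [if_neg hc]
          have h1 : (decide (p < PySem.Str.len s ∧ PySem.Str.pyGet? s p = some '1')) = false := by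
            rw [decide_eq_false_iff_not]
            rintro ⟨-, h⟩; exact hc h
          rw [h1]
          exact ih htail

-- on a strictly ascending list, find? returns the minimum satisfying element
theorem pvFind?_sorted_min (l : List Int) (q : Int → Bool) (hpw : l.Pairwise (· < ·))
    (m : Int) (h : l.find? q = some m) :
    m ∈ l ∧ q m = true ∧ ∀ y ∈ l, q y = true → m ≤ y := by
  rcases List.find?_eq_some_iff_append.mp h with ⟨hqm, as, bs, heq, hprev⟩
  subst heq
  refine ⟨by simp, hqm, ?_⟩
  intro y hy hqy
  rcases List.mem_append.mp hy with h1 | h2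
  · exact absurd hqy (by simpa using hprev y h1)
  · rcases List.mem_cons.mp h2 with h3 | h4
    · omega
    · have := (List.pairwise_append.mp hpw).2.1
      rcases List.pairwise_cons.mp this with ⟨hmb, _⟩
      exact le_of_lt (hmb y h4)

-- two strictly ascending lists whose satisfying sets coincide have the same first hit
theorem pvFind?_congr (l1 l2 : List Int) (q1 q2 : Int → Bool)
    (h1 : l1.Pairwise (· < ·)) (h2 : l2.Pairwise (· < ·))
    (hmem : ∀ x, (x ∈ l1 ∧ q1 x = true) ↔ (x ∈ l2 ∧ q2 x = true)) :
    l1.find? q1 = l2.find? q2 := by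
  cases hf1 : l1.find? q1 with
  | none =>
      have hnone := List.find?_eq_none.mp hf1
      symm; rw [List.find?_eq_none]
      intro x hx hqx
      rcases (hmem x).mpr ⟨hx, hqx⟩ with ⟨hx1, hq1⟩
      exact (hnone x hx1) hq1
  | some m =>
      rcases pvFind?_sorted_min l1 q1 h1 m hf1 with ⟨hm1, hqm1, hmin1⟩
      rcases (hmem m).mp ⟨hm1, hqm1⟩ with ⟨hm2, hqm2⟩
      cases hf2 : l2.find? q2 with
      | none => exact absurd hqm2 (List.find?_eq_none.mp hf2 m hm2)
      | some m' =>
          rcases pvFind?_sorted_min l2 q2 h2 m' hf2 with ⟨hm'2, hqm'2, hmin2⟩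
          rcases (hmem m').mpr ⟨hm'2, hqm'2⟩ with ⟨hm'1, hqm'1⟩
          have h12 := hmin1 m' hm'1 hqm'1
          have h21 := hmin2 m hm2 hqm2
          rw [le_antisymm h12 h21]

-- per string: A's first hit equals B's first hit on the sorted forbidden positions
theorem pvInner_eq (s : String) (pat1 : List Int) :
    pvScanA s pat1 (PySem.List.pyRange 0 (PySem.Str.len s) 1)
      = pvScanB s (PySem.List.sorted (PySem.Set.ofList
          (pat1.filter (fun p => decide (0 ≤ p)))) (fun x => x)) := by
  set forb := PySem.List.sorted (PySem.Set.ofList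
      (pat1.filter (fun p => decide (0 ≤ p)))) (fun x => x) with hforb
  have hperm := PySem.List.sorted_perm (PySem.Set.ofList
      (pat1.filter (fun p => decide (0 ≤ p)))) (fun x => x) false
  have hle : forb.Pairwise (· ≤ ·) := by
    simpa using PySem.List.sorted_pairwise (PySem.Set.ofList
      (pat1.filter (fun p => decide (0 ≤ p)))) (fun x => x)
  have hnd : forb.Nodup := hperm.nodup_iff.mpr (PySem.Set.nodup_ofList _)
  have hlt : forb.Pairwise (· < ·) :=
    (hle.and hnd).imp (fun h => lt_of_le_of_ne h.1 h.2)
  rw [pvScanA_eq_find?, pvScanB_eq_find? s forb hlt]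
  apply pvFind?_congr _ _ _ _ (PySem.List.pairwise_lt_pyRange_one 0 (PySem.Str.len s)) hlt
  intro x
  have hmf : x ∈ forb ↔ (x ∈ pat1 ∧ 0 ≤ x) := by
    rw [hperm.mem_iff, PySem.Set.mem_ofList]
    simp
  simp only [PySem.List.mem_pyRange_one, hmf]
  constructor
  · rintro ⟨⟨hx0, hxn⟩, hq⟩
    rw [decide_eq_true_eq] at hq
    exact ⟨⟨hq.2, hx0⟩, by rw [decide_eq_true_eq]; exact ⟨hxn, hq.1⟩⟩
  · rintro ⟨⟨hx1, hx0⟩, hq⟩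
    rw [decide_eq_true_eq] at hq
    exact ⟨⟨hx0, hq.1⟩, by rw [decide_eq_true_eq]; exact ⟨hq.2, hx1⟩⟩

theorem pv_ports_eq (inputs : List String) (pattern : List (List Int)) :
    by_matching2 inputs pattern = by_matching2_alt inputs pattern := by
  unfold by_matching2 by_matching2_alt
  congr 1
  funext acc s
  rw [pvInner_eq]

-- ===== VERDICT (by name: the statement is the Claim_ definition above) =====
theorem by_matching2_spec : Claim_equal_by_matching2 := by
  intro inputs pattern _ _
  unfold Spec_by_matching2
  exact pv_ports_eq inputs pattern
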